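-- pv_equiv track=rewrite | github.com/a81257/ns3 | ns-3-ub-tools/traffic_maker/algorithms/all_to_all/pairwisev.py | _build_uniform_matrix
-- ===== SOURCE A (Python) =====
-- def _build_uniform_matrix(rank_size: int, with_local: bool = True) -> tuple[list[list[int]], list[list[int]]]:
--     """Helper to produce counts/displacements for uniform all-to-all."""
--     counts = [[0] * rank_size for _ in range(rank_size)]
--     displs = [[0] * rank_size for _ in range(rank_size)]
--     for r in range(rank_size):
--         offset = 0
--         for c in range(rank_size):
--             counts[r][c] = 1 if (with_local or c != r) else 0
--             displs[r][c] = offset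
--             offset += counts[r][c]
--     return counts, displs
-- ===== SOURCE B (Python) =====
-- def _build_uniform_matrix(rank_size: int, with_local: bool = True) -> tuple[list[list[int]], list[list[int]]]:
--     """Closed-form per-cell construction: no running offset accumulator."""
--     counts = [[1 if (with_local or c != r) else 0 for c in range(rank_size)]
--               for r in range(rank_size)]
--     if with_local:
--         displs = [list(range(rank_size)) for _ in range(rank_size)]
--     else:
--         displs = [[c if c <= r else c - 1 for c in range(rank_size)]
--                   for r in range(rank_size)]
--     return counts, displs
-- ===== Notes on version B (the rewrite author's own statement) =====
-- stated objective: alternative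
-- what changed: Replaced the sequential running-offset accumulator with an independent closed-form formula per cell (displs[r][c] = c, or c-1 when c > r without locals), expressed as comprehensions.
import Mathlib
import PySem

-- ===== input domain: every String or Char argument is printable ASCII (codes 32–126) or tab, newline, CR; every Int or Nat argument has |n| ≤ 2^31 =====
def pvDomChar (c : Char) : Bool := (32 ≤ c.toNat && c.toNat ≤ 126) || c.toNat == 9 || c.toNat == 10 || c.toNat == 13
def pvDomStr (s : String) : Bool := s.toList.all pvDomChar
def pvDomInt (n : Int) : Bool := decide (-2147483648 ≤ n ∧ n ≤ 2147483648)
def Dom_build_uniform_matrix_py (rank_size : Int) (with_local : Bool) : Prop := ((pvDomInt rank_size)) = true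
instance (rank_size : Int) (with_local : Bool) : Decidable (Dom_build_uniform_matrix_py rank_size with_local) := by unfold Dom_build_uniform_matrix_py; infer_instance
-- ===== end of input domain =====

-- B replaces A's running-offset accumulator by an independent closed-form formula per cell (alternative decomposition, same cost).


-- ===== PORT A =====
-- inner loop over c: state = (counts row so far, displs row so far, offset)
def pvRowA (with_local : Bool) (rank_size r : Int) : List Int × List Int × Int :=
  -- counts[r][c] is written and immediately read back as offset's increment,
  -- so the same if-expression appears in both places
  (PySem.List.pyRange 0 rank_size 1).foldl
    (fun st c =>
      (st.1 ++ [if with_local ∨ c ≠ r then (1 : Int) else 0],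
       st.2.1 ++ [st.2.2],
       st.2.2 + (if with_local ∨ c ≠ r then 1 else 0)))
    ([], [], 0)

def build_uniform_matrix_py (rank_size : Int) (with_local : Bool) : List (List Int) × List (List Int) :=
  let rows := (PySem.List.pyRange 0 rank_size 1).map (fun r => pvRowA with_local rank_size r)
  (rows.map (fun p => p.1), rows.map (fun p => p.2.1))

-- ===== PORT B =====
def build_uniform_matrix_py_alt (rank_size : Int) (with_local : Bool) : List (List Int) × List (List Int) :=
  let rng := PySem.List.pyRange 0 rank_size 1
  let counts := rng.map (fun r => rng.map (fun c => if with_local ∨ c ≠ r then (1 : Int) else 0))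
  let displs :=
    if with_local then rng.map (fun _ => rng)
    else rng.map (fun r => rng.map (fun c => if c ≤ r then c else c - 1))
  (counts, displs)

-- ===== PRECONDITION & SPEC =====
def Spec_build_uniform_matrix_py (rank_size : Int) (with_local : Bool) (out : List (List Int) × List (List Int)) : Prop := out = build_uniform_matrix_py_alt rank_size with_local
instance (rank_size : Int) (with_local : Bool) (out : List (List Int) × List (List Int)) : Decidable (Spec_build_uniform_matrix_py rank_size with_local out) := by unfold Spec_build_uniform_matrix_py; infer_instance

-- ===== CLAIM (what is proved, stated in full; the proofs are below) =====
def Claim_equal_build_uniform_matrix_py : Prop := ∀ (rank_size : Int) (with_local : Bool), Dom_build_uniform_matrix_py rank_size with_local → Spec_build_uniform_matrix_py rank_size with_local (build_uniform_matrix_py rank_size with_local)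

-- ===== LEMMAS AND PROOFS =====

-- the offset after the first m inner iterations
def pvOff (with_local : Bool) (r : Int) (m : Int) : Int :=
  if with_local then m else if r < m then m - 1 else m

theorem pvRowA_char (with_local : Bool) (r : Int) (hr : 0 ≤ r) (m : Nat) :
    (PySem.List.pyRange 0 (m : Int) 1).foldl
      (fun st c =>
        (st.1 ++ [if with_local ∨ c ≠ r then (1 : Int) else 0],
         st.2.1 ++ [st.2.2],
         st.2.2 + (if with_local ∨ c ≠ r then 1 else 0)))
      (([] : List Int), ([] : List Int), (0 : Int))
    = ((PySem.List.pyRange 0 (m : Int) 1).map (fun c => if with_local ∨ c ≠ r then (1 : Int) else 0),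
       (PySem.List.pyRange 0 (m : Int) 1).map (fun c => if with_local then c else if c ≤ r then c else c - 1),
       pvOff with_local r m) := by
  induction m with
  | zero =>
      unfold pvOff
      split_ifs <;> simp [PySem.List.pyRange_one_eq_nil] <;> omega
  | succ m ih =>
      have h : ((m : Int) + 1) = ((m + 1 : Nat) : Int) := by push_cast; ring
      rw [← h, PySem.List.pyRange_one_succ_right (by positivity), List.foldl_append, ih]
      simp only [List.map_append, List.foldl_cons, List.foldl_nil, List.map_cons, List.map_nil,
        Prod.mk.injEq]
      refine ⟨by trivial, ?_, ?_⟩ <;> simp only [pvOff] <;> split_ifs <;> simp_all <;> omega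

theorem build_uniform_matrix_py_eq (rank_size : Int) (with_local : Bool) :
    build_uniform_matrix_py rank_size with_local = build_uniform_matrix_py_alt rank_size with_local := by
  unfold build_uniform_matrix_py build_uniform_matrix_py_alt pvRowA
  by_cases hn : rank_size ≤ 0
  · simp [PySem.List.pyRange_one_eq_nil hn]
  · push_neg at hn
    have hm : rank_size = ((rank_size.toNat : Nat) : Int) := by omega
    dsimp only
    rw [Prod.mk.injEq]
    refine ⟨?_, ?_⟩
    · -- counts
      rw [List.map_map]
      refine List.map_congr_left (fun r hr => ?_)
      have hr0 : 0 ≤ r := (PySem.List.mem_pyRange_one.mp hr).1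
      simp only [Function.comp]
      rw [hm, pvRowA_char with_local r hr0 rank_size.toNat]
    · -- displs
      rw [List.map_map]
      by_cases hl : with_local = true
      · rw [if_pos hl]
        refine List.map_congr_left (fun r hr => ?_)
        have hr0 : 0 ≤ r := (PySem.List.mem_pyRange_one.mp hr).1
        simp only [Function.comp]
        rw [hm, pvRowA_char with_local r hr0 rank_size.toNat]
        simp [hl]
      · rw [if_neg hl]
        refine List.map_congr_left (fun r hr => ?_)
        have hr0 : 0 ≤ r := (PySem.List.mem_pyRange_one.mp hr).1
        simp only [Function.comp]
        rw [hm, pvRowA_char with_local r hr0 rank_size.toNat]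
        simp [hl]

-- ===== VERDICT (by name: the statement is the Claim_ definition above) =====
theorem build_uniform_matrix_py_spec : Claim_equal_build_uniform_matrix_py := by
  intro rank_size with_local _
  unfold Spec_build_uniform_matrix_py
  exact build_uniform_matrix_py_eq rank_size with_local
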